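-- pv_equiv track=rewrite | github.com/komalsinred-ui/IAM-BUSINESS-ROLE-BUILDER | brb_core/bundling.py | _count_itemsets_k
-- ===== SOURCE A (Python) =====
-- from itertools import combinations
--
-- def _count_itemsets_k(user_roles: dict, frequent_items: list, k: int) -> dict:
--     candidates = list(combinations(sorted(frequent_items), k))
--     counts = {cand: 0 for cand in candidates}
--
--     for roles in user_roles.values():
--         rset = set(roles)
--         for cand in candidates:
--             if set(cand).issubset(rset):
--                 counts[cand] += 1
--
--     return counts
-- ===== SOURCE B (Python) =====
-- from itertools import combinations
--
-- def _count_itemsets_k(user_roles: dict, frequent_items: list, k: int) -> dict: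
--     sf = sorted(frequent_items)
--     hits = {}
--     for roles in user_roles.values():
--         rset = set(roles)
--         for cand in combinations([x for x in sf if x in rset], k):
--             hits[cand] = hits.get(cand, 0) + 1
--     return {cand: hits.get(cand, 0) for cand in combinations(sf, k)}
-- ===== Notes on version B (the rewrite author's own statement) =====
-- stated objective: alternative
-- what changed: A pre-initialises a dict over all global k-candidates and, per user, subset-tests every candidate; B instead keeps a sparse hit counter incremented only at the k-combinations of each user's own frequent roles and assembles the candidate-ordered result dict at the end via get-with-default.
import Mathlib
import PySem

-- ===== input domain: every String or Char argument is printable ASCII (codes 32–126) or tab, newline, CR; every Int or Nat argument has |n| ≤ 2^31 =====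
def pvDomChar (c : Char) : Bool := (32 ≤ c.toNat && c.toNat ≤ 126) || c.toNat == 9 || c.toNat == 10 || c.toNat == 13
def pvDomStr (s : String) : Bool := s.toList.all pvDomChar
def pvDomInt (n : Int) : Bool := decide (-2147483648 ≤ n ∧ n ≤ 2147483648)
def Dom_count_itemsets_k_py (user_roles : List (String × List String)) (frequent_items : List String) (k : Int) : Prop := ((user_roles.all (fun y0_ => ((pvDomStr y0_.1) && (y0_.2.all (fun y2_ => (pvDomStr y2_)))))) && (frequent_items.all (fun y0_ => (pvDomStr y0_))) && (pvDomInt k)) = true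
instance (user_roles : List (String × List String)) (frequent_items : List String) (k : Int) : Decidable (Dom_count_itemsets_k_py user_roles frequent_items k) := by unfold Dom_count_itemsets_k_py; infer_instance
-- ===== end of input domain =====

-- B replaces A's per-user scan over all global candidates (subset test each) by a two-stage
-- counting: a sparse counter incremented only at the k-combinations of each user's own frequent
-- roles, assembled into the candidate-ordered dict at the end (alternative decomposition).

-- ===== PORT A =====
def count_itemsets_k_py (user_roles : List (String × List String)) (frequent_items : List String) (k : Int) : List (List String × Int) :=
  let candidates := PySem.List.combinations (PySem.List.sorted frequent_items (fun x => x) false) k.toNat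
  let counts : PySem.Dict (List String) Int :=
    candidates.foldl (fun d cand => d.insert cand 0) PySem.Dict.empty
  let counts := user_roles.foldl (fun d roles_pair =>
      let rset : PySem.Set String := PySem.Set.ofList roles_pair.2
      candidates.foldl (fun d cand =>
        if PySem.Set.issubset (PySem.Set.ofList cand) rset then d.modify cand 0 (· + 1) else d) d)
    counts
  counts.items

-- ===== PORT B =====
def count_itemsets_k_py_alt (user_roles : List (String × List String)) (frequent_items : List String) (k : Int) : List (List String × Int) :=
  let sf := PySem.List.sorted frequent_items (fun x => x) false
  let hits : PySem.Dict (List String) Int :=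
    user_roles.foldl (fun h roles_pair =>
      let rset : PySem.Set String := PySem.Set.ofList roles_pair.2
      (PySem.List.combinations (sf.filter (fun x => PySem.Set.contains rset x)) k.toNat).foldl
        (fun h cand => h.insert cand (h.getD cand 0 + 1)) h)
    PySem.Dict.empty
  ((PySem.List.combinations sf k.toNat).foldl
      (fun d cand => d.insert cand (hits.getD cand 0)) PySem.Dict.empty).items

-- ===== PRECONDITION & SPEC =====
-- Pre_ excludes k < 0 only, where Python's combinations raises ValueError (both A and B raise there).
def Pre_count_itemsets_k_py (user_roles : List (String × List String)) (frequent_items : List String) (k : Int) : Prop := 0 ≤ k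
instance (user_roles : List (String × List String)) (frequent_items : List String) (k : Int) : Decidable (Pre_count_itemsets_k_py user_roles frequent_items k) := by unfold Pre_count_itemsets_k_py; infer_instance

def pvWitness_count_itemsets_k_py : (List (String × List String)) × List String × Int :=
  ([("u1", ["a", "b"]), ("u2", ["b"])], ["a", "b"], 1)

def Spec_count_itemsets_k_py (user_roles : List (String × List String)) (frequent_items : List String) (k : Int) (out : List (List String × Int)) : Prop := out = count_itemsets_k_py_alt user_roles frequent_items k
instance (user_roles : List (String × List String)) (frequent_items : List String) (k : Int) (out : List (List String × Int)) : Decidable (Spec_count_itemsets_k_py user_roles frequent_items k out) := by unfold Spec_count_itemsets_k_py; infer_instance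

-- ===== CLAIM (what is proved, stated in full; the proofs are below) =====
def Claim_equal_count_itemsets_k_py : Prop := ∀ (user_roles : List (String × List String)) (frequent_items : List String) (k : Int), Dom_count_itemsets_k_py user_roles frequent_items k → Pre_count_itemsets_k_py user_roles frequent_items k → Spec_count_itemsets_k_py user_roles frequent_items k (count_itemsets_k_py user_roles frequent_items k)

-- ===== LEMMAS AND PROOFS =====

-- proof-only abbreviations: the sorted frequent list, A's global candidate list, and the
-- per-user increment list (k-combinations of the user's frequent roles)
def pvSf (frequent_items : List String) : List String :=
  PySem.List.sorted frequent_items (fun x => x) false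

def pvCands (frequent_items : List String) (k : Int) : List (List String) :=
  PySem.List.combinations (pvSf frequent_items) k.toNat

def pvIncs (frequent_items : List String) (k : Int) (p : String × List String) :
    List (List String) :=
  PySem.List.combinations
    ((pvSf frequent_items).filter (fun x => PySem.Set.contains (PySem.Set.ofList p.2) x)) k.toNat

-- combinations of a filtered list = combinations whose every element passes the filter
theorem combinations_filter {α : Type} (p : α → Bool) (xs : List α) : ∀ r : Nat,
    PySem.List.combinations (xs.filter p) r
      = (PySem.List.combinations xs r).filter (fun c => c.all p) := by
  induction xs with
  | nil =>
    intro r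
    cases r <;> simp [PySem.List.combinations_zero, PySem.List.combinations_nil_succ]
  | cons x xs ih =>
    intro r
    cases r with
    | zero => simp [PySem.List.combinations_zero]
    | succ r =>
      by_cases h : p x
      · rw [List.filter_cons_of_pos h, PySem.List.combinations_cons_succ,
            PySem.List.combinations_cons_succ, ih r, ih (r + 1), List.filter_append,
            List.filter_map]
        congr 1
        congr 1
        apply List.filter_congr
        intro c _
        simp [h]
      · rw [List.filter_cons_of_neg h, ih (r + 1), PySem.List.combinations_cons_succ,
            List.filter_append, List.filter_map]
        have : (PySem.List.combinations xs r).filter ((fun c => c.all p) ∘ (x :: ·)) = [] := by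
          apply List.filter_eq_nil_iff.mpr
          intro c _
          simp [h]
        simp [this]

-- the Boolean subset test of A equals the all-elements test of B's filter
theorem issubset_ofList_eq_all (c : List String) (rset : PySem.Set String) :
    PySem.Set.issubset (PySem.Set.ofList c) rset = c.all (fun x => PySem.Set.contains rset x) := by
  simp only [PySem.Set.issubset]
  rw [Bool.eq_iff_iff]
  simp only [List.all_eq_true]
  constructor
  · intro hall x hx
    exact hall x ((PySem.Set.mem_ofList c x).mpr hx)
  · intro hall x hx
    exact hall x ((PySem.Set.mem_ofList c x).mp hx)

-- updating a set with elements it already has changes nothing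
theorem set_update_of_subset {α : Type} [BEq α] [LawfulBEq α] (l : List α) :
    ∀ s : PySem.Set α, (∀ x ∈ l, x ∈ s) → PySem.Set.update s l = s := by
  induction l with
  | nil => intro s _; rfl
  | cons x xs ih =>
    intro s hs
    have hc : PySem.Set.contains s x = true :=
      (PySem.Set.contains_iff s x).mpr (hs x (List.mem_cons_self))
    have hx : PySem.Set.add s x = s := by simp [PySem.Set.add, hs x List.mem_cons_self]
    calc PySem.Set.update s (x :: xs) = PySem.Set.update (PySem.Set.add s x) xs := rfl
      _ = PySem.Set.update s xs := by rw [hx]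
      _ = s := ih s (fun y hy => hs y (by simp [hy]))

-- a fold inserting 0 at every key leaves every getD-with-default-0 at 0
theorem getD_foldl_insert_zero (c : List String) : ∀ (l : List (List String))
    (d : PySem.Dict (List String) Int), d.getD c 0 = 0 →
    (l.foldl (fun d x => d.insert x (0 : Int)) d).getD c 0 = 0 := by
  intro l
  induction l with
  | nil => intro d h; exact h
  | cons x xs ih =>
    intro d h
    apply ih
    rw [PySem.Dict.getD_insert]
    split_ifs <;> simp [h]

-- a fold inserting v x at every key x of l: the result at a key of l is its v-value
theorem getD_foldl_insert_fn (v : List String → Int) (c : List String) :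
    ∀ (l : List (List String)) (d : PySem.Dict (List String) Int),
    (l.foldl (fun d x => d.insert x (v x)) d).getD c 0
      = if c ∈ l then v c else d.getD c 0 := by
  intro l
  induction l with
  | nil => intro d; simp
  | cons x xs ih =>
    intro d
    rw [List.foldl_cons, ih]
    by_cases hx : c ∈ xs
    · simp [hx]
    · by_cases hcx : c = x
      · subst hcx
        simp [hx, PySem.Dict.getD_insert_self]
      · simp [hx, hcx, PySem.Dict.getD_insert_of_ne _ _ _ hcx]

-- every k-combination of a filtered list is a k-combination of the list itself
theorem mem_cands_of_mem_incs (frequent_items : List String) (k : Int)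
    (p : String × List String) (c : List String)
    (h : c ∈ pvIncs frequent_items k p) : c ∈ pvCands frequent_items k := by
  rcases (PySem.List.mem_combinations_iff _ _ _).mp h with ⟨hsub, hlen⟩
  exact (PySem.List.mem_combinations_iff _ _ _).mpr
    ⟨hsub.trans (List.filter_sublist), hlen⟩

-- the closed form A's port reduces to
theorem A_items (user_roles : List (String × List String)) (frequent_items : List String)
    (k : Int) :
    count_itemsets_k_py user_roles frequent_items k
      = (PySem.Set.ofList (pvCands frequent_items k)).map
          (fun c => (c, ((user_roles.flatMap (pvIncs frequent_items k)).count c : Int))) := by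
  show (user_roles.foldl (fun d roles_pair =>
      (pvCands frequent_items k).foldl (fun d cand =>
        if PySem.Set.issubset (PySem.Set.ofList cand) (PySem.Set.ofList roles_pair.2)
        then d.modify cand 0 (· + 1) else d) d)
      ((pvCands frequent_items k).foldl (fun d cand => d.insert cand (0 : Int))
        PySem.Dict.empty)).items = _
  have hbody : (user_roles.foldl (fun d roles_pair =>
      (pvCands frequent_items k).foldl (fun d cand =>
        if PySem.Set.issubset (PySem.Set.ofList cand) (PySem.Set.ofList roles_pair.2)
        then d.modify cand 0 (· + 1) else d) d)
      ((pvCands frequent_items k).foldl (fun d cand => d.insert cand (0 : Int))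
        PySem.Dict.empty))
      = (user_roles.flatMap (pvIncs frequent_items k)).foldl (fun d c => d.modify c 0 (· + 1))
          ((pvCands frequent_items k).foldl (fun d cand => d.insert cand (0 : Int))
            PySem.Dict.empty) := by
    rw [List.foldl_flatMap]
    apply List.foldl_ext
    intro d p _
    show (pvCands frequent_items k).foldl _ d = (pvIncs frequent_items k p).foldl _ d
    rw [show pvIncs frequent_items k p
          = (pvCands frequent_items k).filter (fun c => c.all (fun x =>
              PySem.Set.contains (PySem.Set.ofList p.2) x)) from combinations_filter _ _ _,
        List.foldl_filter]
    apply List.foldl_ext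
    intro d' c _
    rw [issubset_ofList_eq_all]
  rw [hbody]
  have hkeys0 : ((pvCands frequent_items k).foldl (fun d cand => d.insert cand (0 : Int))
      PySem.Dict.empty).keys = PySem.Set.ofList (pvCands frequent_items k) := by
    rw [PySem.Dict.keys_foldl_insert (f := fun _ _ => (0 : Int)), PySem.Dict.keys_empty]
    exact PySem.Set.update_empty _
  have hkeys : ((user_roles.flatMap (pvIncs frequent_items k)).foldl
      (fun d c => d.modify c 0 (· + 1))
      ((pvCands frequent_items k).foldl (fun d cand => d.insert cand (0 : Int))
        PySem.Dict.empty)).keys = PySem.Set.ofList (pvCands frequent_items k) := by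
    rw [PySem.Dict.keys_foldl_modify (f := fun _ _ => (· + 1)), hkeys0]
    apply set_update_of_subset
    intro x hx
    rcases List.mem_flatMap.mp hx with ⟨p, _, hxp⟩
    exact (PySem.Set.mem_ofList _ _).mpr (mem_cands_of_mem_incs _ _ _ _ hxp)
  rw [PySem.Dict.items_eq_map_keys _ (hkeys ▸ PySem.Set.nodup_ofList _) 0, hkeys]
  apply List.map_congr_left
  intro c _
  rw [PySem.Dict.getD_foldl_modify_add_one,
      getD_foldl_insert_zero c _ PySem.Dict.empty (by simp [PySem.Dict.getD_empty])]
  simp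

-- the closed form B's port reduces to (the same one)
theorem B_items (user_roles : List (String × List String)) (frequent_items : List String)
    (k : Int) :
    count_itemsets_k_py_alt user_roles frequent_items k
      = (PySem.Set.ofList (pvCands frequent_items k)).map
          (fun c => (c, ((user_roles.flatMap (pvIncs frequent_items k)).count c : Int))) := by
  have hshape : count_itemsets_k_py_alt user_roles frequent_items k
      = ((pvCands frequent_items k).foldl
          (fun d cand => d.insert cand
            ((user_roles.foldl (fun h roles_pair =>
                (pvIncs frequent_items k roles_pair).foldl
                  (fun h cand => h.insert cand (h.getD cand 0 + 1)) h)
              PySem.Dict.empty).getD cand 0))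
          PySem.Dict.empty).items := rfl
  rw [hshape]
  have hH : (user_roles.foldl (fun h roles_pair =>
      (pvIncs frequent_items k roles_pair).foldl
        (fun h cand => h.insert cand (h.getD cand 0 + 1)) h)
      (PySem.Dict.empty : PySem.Dict (List String) Int))
      = (user_roles.flatMap (pvIncs frequent_items k)).foldl
          (fun d c => d.modify c 0 (· + 1)) PySem.Dict.empty := by
    rw [List.foldl_flatMap]
    rfl
  generalize hHg : (user_roles.foldl (fun h roles_pair =>
      (pvIncs frequent_items k roles_pair).foldl
        (fun h cand => h.insert cand (h.getD cand 0 + 1)) h)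
      (PySem.Dict.empty : PySem.Dict (List String) Int)) = H
  have hkeys : ((pvCands frequent_items k).foldl
      (fun d cand => d.insert cand (H.getD cand 0)) PySem.Dict.empty).keys
      = PySem.Set.ofList (pvCands frequent_items k) := by
    rw [PySem.Dict.keys_foldl_insert (f := fun _ cand => H.getD cand 0),
        PySem.Dict.keys_empty]
    exact PySem.Set.update_empty _
  rw [PySem.Dict.items_eq_map_keys _ (hkeys ▸ PySem.Set.nodup_ofList _) 0, hkeys]
  apply List.map_congr_left
  intro c hc
  rw [getD_foldl_insert_fn]
  simp only [(PySem.Set.mem_ofList _ c).mp hc, if_true]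
  rw [← hH.symm.trans hHg, PySem.Dict.getD_foldl_modify_add_one]
  simp [PySem.Dict.getD_empty]

-- ===== VERDICT (by name: the statement is the Claim_ definition above) =====
theorem count_itemsets_k_py_spec : Claim_equal_count_itemsets_k_py := by
  intro user_roles frequent_items k _ _
  unfold Spec_count_itemsets_k_py
  rw [A_items, B_items]
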